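-- pv_equiv track=rewrite | github.com/kelvinblaser/EulerProject | Euler926.py | roundness
-- ===== SOURCE A (Python) =====
-- def roundness(n: int, /) -> int:
--     """Returns the total roundness of the input - R(n)."""
--     r = 0
--     for divisor in range(2, n + 1):
--         m, pow = n, 0
--         while m % divisor == 0:
--             m //= divisor
--             pow += 1
--         r += pow
--     return r
-- ===== SOURCE B (Python) =====
-- def roundness(n: int, /) -> int:
--     """Total roundness R(n): enumerate only the divisors of n by scanning up to sqrt(n)."""
--     if n < 2:
--         return 0
--
--     def val(d):
--         m, p = n, 0
--         while m % d == 0: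
--             m //= d
--             p += 1
--         return p
--
--     r = 1  # the divisor n itself contributes valuation 1
--     d = 2
--     while d * d <= n:
--         if n % d == 0:
--             r += val(d)
--             if d * d != n:
--                 r += val(n // d)
--         d += 1
--     return r
-- ===== Notes on version B (the rewrite author's own statement) =====
-- stated objective: faster
-- what changed: Instead of scanning every candidate base d from 2 to n, B enumerates only the divisors of n by scanning d up to sqrt(n) and handling the paired co-divisor n//d (plus n itself), computing each divisor's valuation with the same repeated-division step.
import Mathlib
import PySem

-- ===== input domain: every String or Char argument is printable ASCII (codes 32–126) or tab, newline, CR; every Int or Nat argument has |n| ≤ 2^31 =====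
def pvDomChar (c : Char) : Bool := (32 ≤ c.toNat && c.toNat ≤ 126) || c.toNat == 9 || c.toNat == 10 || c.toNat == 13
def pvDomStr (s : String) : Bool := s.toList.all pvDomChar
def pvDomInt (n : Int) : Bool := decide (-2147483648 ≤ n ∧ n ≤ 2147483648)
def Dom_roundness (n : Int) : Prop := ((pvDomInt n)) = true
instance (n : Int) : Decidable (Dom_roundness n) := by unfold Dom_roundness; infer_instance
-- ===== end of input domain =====

-- B sums valuations only over the divisors of n, found by scanning d up to √n and
-- pairing d with n//d, instead of scanning every d from 2 to n (objective: faster).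

-- ===== PORT A =====
-- inner 'while m % divisor == 0: m //= divisor; pow += 1' loop, with fuel (n.toNat is
-- always enough: m starts at n and strictly decreases; the guard only makes it total)
def pvVal (d m : Int) : Nat → Int
  | 0 => 0
  | fuel + 1 =>
    if PySem.Int.mod m d = 0 then pvVal d (PySem.Int.floordiv m d) fuel + 1 else 0

def roundness (n : Int) : Int :=
  (PySem.List.pyRange 2 (n + 1) 1).foldl (fun r divisor => r + pvVal divisor n n.toNat) 0

-- ===== PORT B =====
-- 'while d * d <= n' loop of Source B, with fuel (n.toNat iterations always suffice)
def pvBloop (n : Int) : Int → Int → Nat → Int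
  | _, r, 0 => r
  | d, r, fuel + 1 =>
    if d * d ≤ n then
      pvBloop n (d + 1)
        (if PySem.Int.mod n d = 0 then
          r + pvVal d n n.toNat +
            (if d * d ≠ n then pvVal (PySem.Int.floordiv n d) n n.toNat else 0)
         else r) fuel
    else r

def roundness_alt (n : Int) : Int :=
  if n < 2 then 0 else pvBloop n 2 1 n.toNat

-- ===== PRECONDITION & SPEC =====
def Spec_roundness (n : Int) (out : Int) : Prop := out = roundness_alt n
instance (n : Int) (out : Int) : Decidable (Spec_roundness n out) := by unfold Spec_roundness; infer_instance

-- ===== CLAIM (what is proved, stated in full; the proofs are below) =====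
def Claim_equal_roundness : Prop := ∀ (n : Int), Dom_roundness n → Spec_roundness n (roundness n)

-- ===== LEMMAS AND PROOFS =====

-- the integer square root used to describe B's loop range
def pvSqrt (n : Int) : Int := (n.toNat.sqrt : Int)

lemma pvSqrt_le_self {n : Int} (hn : 0 ≤ n) : pvSqrt n ≤ n := by
  unfold pvSqrt
  have h := Nat.sqrt_le_self n.toNat
  omega

lemma le_pvSqrt_iff {n d : Int} (hn : 0 ≤ n) (hd : 0 ≤ d) :
    d ≤ pvSqrt n ↔ d * d ≤ n := by
  unfold pvSqrt
  have h := @Nat.le_sqrt d.toNat n.toNat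
  have h2 : d.toNat * d.toNat ≤ n.toNat ↔ d * d ≤ n := by
    constructor
    · intro hh
      have h3 : ((d.toNat * d.toNat : Nat) : Int) ≤ ((n.toNat : Nat) : Int) := by
        exact_mod_cast hh
      push_cast at h3
      rw [Int.toNat_of_nonneg hd, Int.toNat_of_nonneg hn] at h3
      exact h3
    · intro hh
      have : ((d.toNat * d.toNat : Nat) : Int) ≤ ((n.toNat : Nat) : Int) := by
        push_cast; nlinarith [Int.toNat_of_nonneg hd, Int.toNat_of_nonneg hn]
      exact_mod_cast this
  constructor
  · intro hds; exact h2.mp (h.mp (by omega))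
  · intro hdd; have := h.mpr (h2.mpr hdd); omega

lemma pvVal_of_not_dvd {d n : Int} (fuel : Nat) (hf : 1 ≤ fuel) (h : ¬ d ∣ n) :
    pvVal d n fuel = 0 := by
  obtain ⟨k, rfl⟩ : ∃ k, fuel = k + 1 := ⟨fuel - 1, by omega⟩
  simp [pvVal, PySem.Int.mod_eq_zero_iff_dvd, h]

lemma pvVal_self {n : Int} (hn : 2 ≤ n) (fuel : Nat) (hf : 2 ≤ fuel) :
    pvVal n n fuel = 1 := by
  obtain ⟨k, rfl⟩ : ∃ k, fuel = k + 2 := ⟨fuel - 2, by omega⟩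
  have h1 : PySem.Int.mod n n = 0 := (PySem.Int.mod_eq_zero_iff_dvd n n).mpr dvd_rfl
  have h2 : PySem.Int.floordiv n n = 1 := by
    rw [PySem.Int.floordiv_eq_ediv_of_pos (by omega)]
    exact Int.ediv_self (by omega)
  have h3 : ¬ (n ∣ (1 : Int)) := by
    intro h; have := Int.le_of_dvd (by omega) h; omega
  simp [pvVal, h1, h2, PySem.Int.mod_eq_zero_iff_dvd, h3]

lemma Icc_int_insert {a c : Int} (h : a ≤ c) :
    Finset.Icc a c = insert a (Finset.Icc (a + 1) c) := by
  ext x; simp [Finset.mem_Icc, Finset.mem_insert]; omega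

-- A's outer for-loop is the sum of pvVal over the integer interval
lemma foldl_range_sum (f : Int → Int) :
    ∀ (k : Nat) (a b r : Int), (b - a).toNat = k →
      (PySem.List.pyRange a b 1).foldl (fun r d => r + f d) r
        = r + ∑ d ∈ Finset.Icc a (b - 1), f d := by
  intro k
  induction k with
  | zero =>
    intro a b r hk
    rw [PySem.List.pyRange_one_eq_nil (by omega)]
    rw [Finset.Icc_eq_empty (by omega)]
    simp
  | succ k ih =>
    intro a b r hk
    rw [PySem.List.pyRange_one_cons (by omega)]
    simp only [List.foldl_cons]
    rw [ih (a + 1) b (r + f a) (by omega)]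
    rw [Icc_int_insert (by omega : a ≤ b - 1)]
    rw [Finset.sum_insert (by simp only [Finset.mem_Icc]; omega)]
    ring

-- B's while-loop is 'r +' the sum of its per-divisor contribution over Icc d (pvSqrt n)
lemma pvBloop_sum {n : Int} (hn : 2 ≤ n) :
    ∀ (fuel : Nat) (d r : Int), 2 ≤ d → (pvSqrt n + 1 - d).toNat ≤ fuel →
      pvBloop n d r fuel
        = r + ∑ e ∈ Finset.Icc d (pvSqrt n),
            (if PySem.Int.mod n e = 0 then
               pvVal e n n.toNat +
                 (if e * e ≠ n then pvVal (PySem.Int.floordiv n e) n n.toNat else 0)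
             else 0) := by
  intro fuel
  induction fuel with
  | zero =>
    intro d r hd hf
    rw [Finset.Icc_eq_empty (by omega)]
    simp [pvBloop]
  | succ fuel ih =>
    intro d r hd hf
    by_cases hdd : d * d ≤ n
    · have hds : d ≤ pvSqrt n := (le_pvSqrt_iff (by omega) (by omega)).mpr hdd
      simp only [pvBloop, if_pos hdd]
      rw [ih (d + 1) _ (by omega) (by omega)]
      rw [Icc_int_insert hds, Finset.sum_insert (by simp only [Finset.mem_Icc]; omega)]
      split_ifs <;> ring
    · have hds : ¬ d ≤ pvSqrt n := fun h => hdd ((le_pvSqrt_iff (by omega) (by omega)).mp h)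
      simp only [pvBloop, if_neg hdd]
      rw [Finset.Icc_eq_empty (by omega)]
      simp

-- the central pairing identity
lemma pair_sum {n : Int} (hn : 2 ≤ n) :
    ∑ d ∈ Finset.Icc 2 n, pvVal d n n.toNat
      = 1 + ∑ e ∈ Finset.Icc 2 (pvSqrt n),
          (if PySem.Int.mod n e = 0 then
             pvVal e n n.toNat +
               (if e * e ≠ n then pvVal (PySem.Int.floordiv n e) n n.toNat else 0)
           else 0) := by
  have hfuel : 2 ≤ n.toNat := by omega
  have hs1 : (1 : Int) ≤ pvSqrt n :=
    (le_pvSqrt_iff (by omega) (by omega)).mpr (by omega)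
  have hsn : pvSqrt n ≤ n := pvSqrt_le_self (by omega)
  have hc : ∀ e k : Int, 0 < e → n = e * k → PySem.Int.floordiv n e = k := by
    intro e k he hk
    rw [PySem.Int.floordiv_eq_ediv_of_pos he, hk, Int.mul_ediv_cancel_left k (by omega)]
  set f : Int → Int := fun d => pvVal d n n.toNat with hf
  set P : Finset Int := (Finset.Icc 2 (pvSqrt n)).filter (fun e => e ∣ n) with hP
  set Phi : Finset Int :=
    ((Finset.Icc 2 n).filter (fun e => e ∣ n)).filter (fun e => ¬ (e * e ≤ n)) with hPhi
  set Lf : Finset Int := P.filter (fun e => e * e ≠ n) with hLf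
  set L1 : Finset Int :=
    (Finset.Icc 1 (pvSqrt n)).filter (fun e => e ∣ n ∧ e * e ≠ n) with hL1
  have hR : (Finset.Icc 2 (pvSqrt n)).sum (fun e =>
      (if PySem.Int.mod n e = 0 then
         f e + (if e * e ≠ n then f (PySem.Int.floordiv n e) else 0) else 0))
      = P.sum f + Lf.sum (fun e => f (PySem.Int.floordiv n e)) := by
    have h1 : ∀ e ∈ Finset.Icc 2 (pvSqrt n),
        (if PySem.Int.mod n e = 0 then
           f e + (if e * e ≠ n then f (PySem.Int.floordiv n e) else 0) else 0)
        = (if e ∣ n then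
           f e + (if e * e ≠ n then f (PySem.Int.floordiv n e) else 0) else 0) := by
      intro e _; simp [PySem.Int.mod_eq_zero_iff_dvd]
    rw [Finset.sum_congr rfl h1, ← Finset.sum_filter, ← hP, Finset.sum_add_distrib,
      ← Finset.sum_filter, ← hLf]
  have hL : (Finset.Icc 2 n).sum f = P.sum f + Phi.sum f := by
    have h0 : ((Finset.Icc 2 n).filter (fun e => e ∣ n)).filter (fun e => e * e ≤ n) = P := by
      ext e
      simp only [hP, Finset.mem_filter, Finset.mem_Icc]
      constructor
      · rintro ⟨⟨⟨h2, _⟩, hdvd⟩, hsq⟩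
        exact ⟨⟨h2, (le_pvSqrt_iff (by omega) (by omega)).mpr hsq⟩, hdvd⟩
      · rintro ⟨⟨h2, hls⟩, hdvd⟩
        exact ⟨⟨⟨h2, by omega⟩, hdvd⟩, (le_pvSqrt_iff (by omega) (by omega)).mp hls⟩
    rw [← Finset.sum_filter_of_ne
        (fun d hd hne => by
          by_contra hdvd
          exact hne (pvVal_of_not_dvd n.toNat (by omega) hdvd)),
      ← Finset.sum_filter_add_sum_filter_not ((Finset.Icc 2 n).filter (fun e => e ∣ n))
        (fun e => e * e ≤ n) f, h0, ← hPhi]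
  have hpair : Phi.sum f = L1.sum (fun e => f (PySem.Int.floordiv n e)) := by
    apply Finset.sum_nbij' (fun e => PySem.Int.floordiv n e) (fun e => PySem.Int.floordiv n e)
    · intro a ha
      simp only [hPhi, hL1, Finset.mem_filter, Finset.mem_Icc] at ha ⊢
      obtain ⟨⟨⟨h2, _⟩, k, hk⟩, hsq⟩ := ha
      have hk0 : 0 < k := by nlinarith
      have hka : k < a := by nlinarith
      have hkk : k * k < n := by nlinarith
      rw [hc a k (by omega) hk]
      exact ⟨⟨by omega, (le_pvSqrt_iff (by omega) (by omega)).mpr (by omega)⟩,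
        ⟨a, by rw [hk]; ring⟩, by omega⟩
    · intro a ha
      simp only [hPhi, hL1, Finset.mem_filter, Finset.mem_Icc] at ha ⊢
      obtain ⟨⟨h1, hls⟩, ⟨k, hk⟩, hne⟩ := ha
      have haa : a * a < n := by
        have h4 := (le_pvSqrt_iff (by omega) (by omega)).mp hls
        omega
      have hk0 : 0 < k := by nlinarith
      have hak : a < k := by nlinarith
      have hkk : n < k * k := by nlinarith
      rw [hc a k (by omega) hk]
      exact ⟨⟨⟨by omega, Int.le_of_dvd (by omega) ⟨a, by rw [hk]; ring⟩⟩,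
        ⟨a, by rw [hk]; ring⟩⟩, by omega⟩
    · intro a ha
      simp only [hPhi, Finset.mem_filter, Finset.mem_Icc] at ha
      obtain ⟨⟨⟨h2, _⟩, k, hk⟩, _⟩ := ha
      have hk0 : 0 < k := by nlinarith
      rw [hc a k (by omega) hk, hc k a (by omega) (by rw [hk]; ring)]
    · intro a ha
      simp only [hL1, Finset.mem_filter, Finset.mem_Icc] at ha
      obtain ⟨⟨h1, _⟩, ⟨k, hk⟩, _⟩ := ha
      have hk0 : 0 < k := by nlinarith
      rw [hc a k (by omega) hk, hc k a (by omega) (by rw [hk]; ring)]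
    · intro a ha
      simp only [hPhi, Finset.mem_filter, Finset.mem_Icc] at ha
      obtain ⟨⟨⟨h2, _⟩, k, hk⟩, _⟩ := ha
      have hk0 : 0 < k := by nlinarith
      rw [hc a k (by omega) hk, hc k a (by omega) (by rw [hk]; ring)]
  have hL1eq : L1 = insert 1 Lf := by
    ext x
    simp only [hL1, hLf, hP, Finset.mem_insert, Finset.mem_filter, Finset.mem_Icc]
    constructor
    · rintro ⟨⟨hx1, hxs⟩, hdvd, hne⟩
      by_cases hx : x = 1
      · exact Or.inl hx
      · exact Or.inr ⟨⟨⟨by omega, hxs⟩, hdvd⟩, hne⟩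
    · rintro (rfl | ⟨⟨⟨hx2, hxs⟩, hdvd⟩, hne⟩)
      · exact ⟨⟨le_refl 1, hs1⟩, one_dvd n, by omega⟩
      · exact ⟨⟨by omega, hxs⟩, hdvd, hne⟩
  have hsum1 : L1.sum (fun e => f (PySem.Int.floordiv n e))
      = 1 + Lf.sum (fun e => f (PySem.Int.floordiv n e)) := by
    rw [hL1eq, Finset.sum_insert (by
      simp only [hLf, hP, Finset.mem_filter, Finset.mem_Icc]
      rintro ⟨⟨⟨h2, _⟩, _⟩, _⟩; omega)]
    have h1n : PySem.Int.floordiv n 1 = n := hc 1 n (by omega) (by ring)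
    simp only [h1n, hf, pvVal_self hn n.toNat (by omega)]
  have key : (Finset.Icc 2 n).sum f
      = 1 + (Finset.Icc 2 (pvSqrt n)).sum (fun e =>
          (if PySem.Int.mod n e = 0 then
             f e + (if e * e ≠ n then f (PySem.Int.floordiv n e) else 0) else 0)) := by
    rw [hL, hpair, hsum1, hR]; ring
  exact key

-- ===== VERDICT (by name: the statement is the Claim_ definition above) =====
theorem roundness_spec : Claim_equal_roundness := by
  intro n _
  unfold Spec_roundness roundness roundness_alt
  by_cases hn : n < 2
  · rw [PySem.List.pyRange_one_eq_nil (by omega)]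
    simp [hn]
  · have hn2 : 2 ≤ n := by omega
    rw [if_neg (by omega)]
    rw [foldl_range_sum _ (n + 1 - 2).toNat 2 (n + 1) 0 rfl]
    rw [pvBloop_sum hn2 n.toNat 2 1 (by omega)
      (by have := pvSqrt_le_self (by omega : (0:Int) ≤ n); omega)]
    have : n + 1 - 1 = n := by omega
    rw [this, pair_sum hn2]
    ring
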